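-- pv_equiv track=rewrite | github.com/steve-sanogo/RxPersonna | ner_engine.py | enrich_and_merge_groups
-- ===== SOURCE A (Python) =====
-- def enrich_and_merge_groups(groupes, alias_map):
--     """
--     1. Ajoute les formes originales de l'ALIAS_MAP dans chaque groupe
--        (pour que compute_cooccurrences les retrouve dans le texte)
--     2. Fusionne les groupes qui partagent le même canonical
--     """
--     # Reverse map : canonical -> [formes originales]
--     from collections import defaultdict
--     canon_to_originals = defaultdict(set)
--     for original, canonical in alias_map.items():
--         canon_to_originals[canonical].add(original)
--
--     # Pour chaque groupe, identifier son canonical et récupérer toutes ses formes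
--     def get_canonical(groupe):
--         for nom in groupe:
--             if nom in alias_map:
--                 return alias_map[nom]
--         return groupe[0]  # déjà canonique
--
--     # Regrouper par canonical
--     merged = defaultdict(set)
--     for groupe in groupes:
--         canonical = get_canonical(groupe)
--         merged[canonical].update(groupe)
--         # Ajouter toutes les formes originales connues pour ce canonical
--         merged[canonical].update(canon_to_originals.get(canonical, set()))
--
--     # Reconstruire les listes : canonical en premier, puis le reste
--     result = []
--     for canonical, members in merged.items():
--         members.discard(canonical)
--         groupe_final = [canonical] + sorted(members)
--         result.append(groupe_final)
--
--     return result
-- ===== SOURCE B (Python) =====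
-- def enrich_and_merge_groups(groupes, alias_map):
--     # Alternative strategy: no merged dict and no reverse index.  Compute each
--     # group's canonical once, then for each first-seen canonical build its
--     # whole output entry directly by scanning all groups sharing that
--     # canonical and the alias_map entries pointing to it.
--     canons = [next((alias_map[nom] for nom in g if nom in alias_map), g[0])
--               for g in groupes]
--     out = []
--     prev = []
--     for c in canons:
--         if c not in prev:
--             members = {x for g, cg in zip(groupes, canons) if cg == c for x in g}
--             members.update(o for o, k in alias_map.items() if k == c)
--             members.discard(c)
--             out.append([c] + sorted(members))
--         prev.append(c)
--     return out
-- ===== Notes on version B (the rewrite author's own statement) =====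
-- stated objective: alternative
-- what changed: B never builds A's merged dict or reverse index: it precomputes each group's canonical, then for each first-seen canonical constructs its whole output entry directly by scanning all groups with that canonical and the alias_map entries pointing to it.
import Mathlib
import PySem

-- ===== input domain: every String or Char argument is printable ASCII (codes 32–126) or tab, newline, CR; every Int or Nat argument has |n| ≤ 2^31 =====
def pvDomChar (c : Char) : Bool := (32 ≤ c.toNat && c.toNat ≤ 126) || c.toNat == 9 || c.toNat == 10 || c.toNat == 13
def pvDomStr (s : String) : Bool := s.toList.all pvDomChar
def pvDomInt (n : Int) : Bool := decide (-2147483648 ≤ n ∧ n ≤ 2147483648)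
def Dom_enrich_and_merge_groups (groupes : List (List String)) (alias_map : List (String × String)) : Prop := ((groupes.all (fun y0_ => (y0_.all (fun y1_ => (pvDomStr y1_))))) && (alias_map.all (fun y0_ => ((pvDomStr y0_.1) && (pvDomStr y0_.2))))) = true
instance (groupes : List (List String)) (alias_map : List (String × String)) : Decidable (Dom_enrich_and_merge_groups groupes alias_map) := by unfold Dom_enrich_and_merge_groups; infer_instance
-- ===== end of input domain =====

-- B drops A's incremental merged dict and reverse index entirely: it computes each group's canonical
-- once and then builds every output entry by direct scans (objective: alternative). Return value only.

-- ===== PORT A =====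
-- 'for nom in groupe: if nom in alias_map: return alias_map[nom]'
def pvCanonLoopA (am : PySem.Dict String String) : List String → Option String
  | [] => none
  | nom :: rest => if am.contains nom then am.get? nom else pvCanonLoopA am rest

-- get_canonical; 'none' = IndexError of groupe[0] on an empty group (excluded by Pre_)
def pvGetCanonicalA (am : PySem.Dict String String) (groupe : List String) : Option String :=
  match pvCanonLoopA am groupe with
  | some c => some c
  | none => PySem.List.pyGet? groupe 0

-- 'merged[canonical].update(groupe); merged[canonical].update(canon_to_originals.get(canonical, set()))'
def pvStepA (am : PySem.Dict String String) (cto : PySem.Dict String (PySem.Set String))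
    (m : PySem.Dict String (PySem.Set String)) (groupe : List String) :
    PySem.Dict String (PySem.Set String) :=
  let canonical := (pvGetCanonicalA am groupe).getD ""  -- total form; empty groups are excluded by Pre_
  let m := m.modify canonical PySem.Set.empty (fun s => s.update groupe)
  m.modify canonical PySem.Set.empty (fun s => s.update (cto.getD canonical PySem.Set.empty))

-- the result loop: 'members.discard(canonical); result.append([canonical] + sorted(members))'
def pvFinalizeA (m : PySem.Dict String (PySem.Set String)) : List (List String) :=
  m.items.foldl (fun result p =>
    result ++ [p.1 :: PySem.List.sorted (p.2.discard p.1) (fun x => x)]) []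

def enrich_and_merge_groups (groupes : List (List String)) (alias_map : List (String × String)) : List (List String) :=
  let am : PySem.Dict String String := PySem.Dict.mk alias_map
  -- canon_to_originals = defaultdict(set); for original, canonical in alias_map.items(): ….add(original)
  let canonToOriginals : PySem.Dict String (PySem.Set String) :=
    alias_map.foldl (fun d p => d.modify p.2 PySem.Set.empty (fun s => s.add p.1)) PySem.Dict.empty
  let merged := groupes.foldl (pvStepA am canonToOriginals) PySem.Dict.empty
  pvFinalizeA merged

-- ===== PORT B =====
-- canons entry: next((alias_map[nom] for nom in g if nom in alias_map), g[0])
def pvCanonB (am : PySem.Dict String String) (g : List String) : String :=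
  match g.find? (fun nom => am.contains nom) with
  | some nom => (am.get? nom).getD ""
  | none => (PySem.List.pyGet? g 0).getD ""  -- total form; empty groups are excluded by Pre_

-- one output entry: members from all groups with this canonical, plus alias_map originals, minus c, sorted
def pvEntryB (groupes : List (List String)) (canons : List String)
    (alias_map : List (String × String)) (c : String) : List String :=
  let members : PySem.Set String :=
    PySem.Set.ofList (((groupes.zip canons).filter (fun p => p.2 == c)).flatMap (fun p => p.1))
  let members := members.update ((alias_map.filter (fun p => p.2 == c)).map (fun p => p.1))
  let members := members.discard c
  c :: PySem.List.sorted members (fun x => x)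

-- 'for c in canons: if c not in prev: out.append(entry); prev.append(c)'
def pvLoopB (groupes : List (List String)) (canons : List String)
    (alias_map : List (String × String)) : List String → List String → List (List String)
  | _, [] => []
  | prev, c :: rest =>
    if c ∈ prev then pvLoopB groupes canons alias_map (prev ++ [c]) rest
    else pvEntryB groupes canons alias_map c :: pvLoopB groupes canons alias_map (prev ++ [c]) rest

def enrich_and_merge_groups_alt (groupes : List (List String)) (alias_map : List (String × String)) : List (List String) :=
  let am : PySem.Dict String String := PySem.Dict.mk alias_map
  let canons := groupes.map (pvCanonB am)
  pvLoopB groupes canons alias_map [] canons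

-- ===== PRECONDITION & SPEC =====
-- Pre_ excludes inputs containing an empty group: there both A and B raise IndexError (g[0]).
def Pre_enrich_and_merge_groups (groupes : List (List String)) (alias_map : List (String × String)) : Prop :=
  ∀ g ∈ groupes, g ≠ []
instance (groupes : List (List String)) (alias_map : List (String × String)) : Decidable (Pre_enrich_and_merge_groups groupes alias_map) := by unfold Pre_enrich_and_merge_groups; infer_instance

def pvWitness_enrich_and_merge_groups : List (List String) × (List (String × String)) :=
  ([["Dr. House", "House"], ["Wilson"]], [("Dr. House", "House"), ("Jim", "Wilson")])

def Spec_enrich_and_merge_groups (groupes : List (List String)) (alias_map : List (String × String)) (out : List (List String)) : Prop := out = enrich_and_merge_groups_alt groupes alias_map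
instance (groupes : List (List String)) (alias_map : List (String × String)) (out : List (List String)) : Decidable (Spec_enrich_and_merge_groups groupes alias_map out) := by unfold Spec_enrich_and_merge_groups; infer_instance

-- ===== CLAIM (what is proved, stated in full; the proofs are below) =====
def Claim_equal_enrich_and_merge_groups : Prop := ∀ (groupes : List (List String)) (alias_map : List (String × String)), Dom_enrich_and_merge_groups groupes alias_map → Pre_enrich_and_merge_groups groupes alias_map → Spec_enrich_and_merge_groups groupes alias_map (enrich_and_merge_groups groupes alias_map)

-- ===== LEMMAS AND PROOFS =====

-- originals mapped to k by alias_map, in order (proof-side spec of the enrichment)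
def pvOrigs : List (String × String) → String → List String
  | [], _ => []
  | p :: rest, k => if p.2 = k then p.1 :: pvOrigs rest k else pvOrigs rest k

lemma pvOrigs_mem (l : List (String × String)) (k x : String) :
    x ∈ pvOrigs l k ↔ ∃ p ∈ l, p.2 = k ∧ x = p.1 := by
  induction l with
  | nil => simp [pvOrigs]
  | cons p rest ih =>
    by_cases h : p.2 = k <;> simp [pvOrigs, h, ih] <;> tauto

-- the reverse index of A holds exactly pvOrigs
lemma pv_cto_mem (l : List (String × String)) (d : PySem.Dict String (PySem.Set String)) (k x : String) :
    (x ∈ (l.foldl (fun d p => d.modify p.2 PySem.Set.empty (fun s => s.add p.1)) d).getD k PySem.Set.empty)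
      ↔ x ∈ d.getD k PySem.Set.empty ∨ x ∈ pvOrigs l k := by
  induction l generalizing d with
  | nil => simp [pvOrigs]
  | cons p rest ih =>
    simp only [List.foldl_cons]
    rw [ih, PySem.Dict.getD_modify]
    by_cases hpk : p.2 = k
    · subst hpk
      simp [pvOrigs, PySem.Set.mem_add]
      tauto
    · have hkp : ¬ k = p.2 := fun h => hpk h.symm
      simp [pvOrigs, hpk, hkp]

-- keys of an insert, as a plain if
lemma pv_keys_insert (d : PySem.Dict String (PySem.Set String)) (k : String) (v : PySem.Set String) :
    (d.insert k v).keys = if k ∈ d.keys then d.keys else d.keys ++ [k] := by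
  have := PySem.Dict.keys_foldl_insert (l := [k]) (f := fun _ _ => v) (d := d)
  simp [PySem.Set.update, PySem.Set.add] at this
  simpa using this

-- both ports compute the same canonical for every group
lemma pv_canon_eq (am : PySem.Dict String String) (g : List String) :
    (pvGetCanonicalA am g).getD "" = pvCanonB am g := by
  unfold pvCanonB
  have h : pvCanonLoopA am g = (g.find? (fun nom => am.contains nom)).bind (fun nom => am.get? nom) := by
    induction g with
    | nil => rfl
    | cons nom rest ih =>
      by_cases hc : am.contains nom = true
      · simp [pvCanonLoopA, hc]
      · simp [pvCanonLoopA, hc, ih]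
  unfold pvGetCanonicalA
  rw [h]
  cases hf : g.find? (fun nom => am.contains nom) with
  | none => simp
  | some nom =>
    have hc : am.contains nom = true := List.find?_some hf
    rw [PySem.Dict.contains_eq_isSome_get?] at hc
    cases hg : am.get? nom with
    | none => simp [hg] at hc
    | some c => simp [hg]

-- keys of A's merged fold: first-appearance set of the canonicals
lemma pvA_keys (am : PySem.Dict String String) (cto : PySem.Dict String (PySem.Set String))
    (l : List (List String)) (m : PySem.Dict String (PySem.Set String)) :
    (l.foldl (pvStepA am cto) m).keys =
      PySem.Set.update m.keys (l.map (fun g => (pvGetCanonicalA am g).getD "")) := by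
  induction l generalizing m with
  | nil => simp [PySem.Set.update]
  | cons g rest ih =>
    simp only [List.foldl_cons, List.map_cons]
    rw [ih]
    have hstep : (pvStepA am cto m g).keys = PySem.Set.add m.keys ((pvGetCanonicalA am g).getD "") := by
      unfold pvStepA
      rw [PySem.Dict.keys_modify, pv_keys_insert, PySem.Dict.keys_modify, pv_keys_insert,
          PySem.Set.add_eq_ite]
      by_cases hmem : (pvGetCanonicalA am g).getD "" ∈ m.keys
      · simp [hmem]
      · simp [hmem]
    rw [hstep, PySem.Set.update_cons, PySem.Set.update]

-- membership in A's merged fold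
lemma pvA_getD (am : PySem.Dict String String) (cto : PySem.Dict String (PySem.Set String))
    (l : List (List String)) (m : PySem.Dict String (PySem.Set String)) (k x : String) :
    x ∈ (l.foldl (pvStepA am cto) m).getD k PySem.Set.empty ↔
      x ∈ m.getD k PySem.Set.empty ∨
        ∃ g ∈ l, (pvGetCanonicalA am g).getD "" = k ∧ (x ∈ g ∨ x ∈ cto.getD k PySem.Set.empty) := by
  induction l generalizing m with
  | nil => simp
  | cons g rest ih =>
    simp only [List.foldl_cons]
    rw [ih]
    have hstep : ∀ y, y ∈ (pvStepA am cto m g).getD k PySem.Set.empty ↔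
        y ∈ m.getD k PySem.Set.empty ∨
          ((pvGetCanonicalA am g).getD "" = k ∧ (y ∈ g ∨ y ∈ cto.getD k PySem.Set.empty)) := by
      intro y
      unfold pvStepA
      by_cases hkc : k = (pvGetCanonicalA am g).getD ""
      · subst hkc
        rw [PySem.Dict.getD_modify_self, PySem.Dict.getD_modify_self]
        simp [PySem.Set.mem_update]
        tauto
      · have h2 : ¬ (pvGetCanonicalA am g).getD "" = k := fun h => hkc h.symm
        rw [PySem.Dict.getD_modify, if_neg hkc, PySem.Dict.getD_modify, if_neg hkc]
        simp [h2]
    simp only [hstep, List.mem_cons]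
    constructor
    · rintro (⟨h | h⟩ | ⟨g', hg', hc, hx⟩)
      · exact Or.inl h
      · exact Or.inr ⟨g, Or.inl rfl, h⟩
      · exact Or.inr ⟨g', Or.inr hg', hc, hx⟩
    · rintro (h | ⟨g', hg' | hg', hc, hx⟩)
      · exact Or.inl (Or.inl h)
      · exact Or.inl (Or.inr ⟨hg' ▸ hc, hg' ▸ hx⟩)
      · exact Or.inr ⟨g', hg', hc, hx⟩

-- the merged sets stay duplicate-free
lemma pvA_nodup (am : PySem.Dict String String) (cto : PySem.Dict String (PySem.Set String))
    (l : List (List String)) (m : PySem.Dict String (PySem.Set String))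
    (h : ∀ k, (m.getD k PySem.Set.empty).Nodup) (k : String) :
    ((l.foldl (pvStepA am cto) m).getD k PySem.Set.empty).Nodup := by
  induction l generalizing m with
  | nil => exact h k
  | cons g rest ih =>
    simp only [List.foldl_cons]
    apply ih
    intro k2
    unfold pvStepA
    by_cases h1 : k2 = (pvGetCanonicalA am g).getD ""
    · subst h1
      rw [PySem.Dict.getD_modify_self, PySem.Dict.getD_modify_self]
      exact PySem.Set.nodup_update _ _ (PySem.Set.nodup_update _ _ (h _))
    · rw [PySem.Dict.getD_modify, if_neg h1, PySem.Dict.getD_modify, if_neg h1]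
      exact h k2

-- first-appearance dedup relative to a seen-set (proof-side shape of both loops)
def pvNewKeys (prev : List String) : List String → List String
  | [] => []
  | c :: r => if c ∈ prev then pvNewKeys prev r else c :: pvNewKeys (c :: prev) r

lemma pv_mem_app_self {c : String} {p : List String} (hc : c ∈ p) (x : String) :
    x ∈ p ++ [c] ↔ x ∈ p := by
  simp only [List.mem_append, List.mem_singleton]
  constructor
  · rintro (h | rfl)
    · exact h
    · exact hc
  · exact Or.inl

lemma pv_mem_app_cons (c : String) (p : List String) (x : String) :
    x ∈ p ++ [c] ↔ x ∈ c :: p := by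
  simp [or_comm]

lemma pvNewKeys_congr {p₁ p₂ : List String} (cs : List String)
    (h : ∀ x, x ∈ p₁ ↔ x ∈ p₂) : pvNewKeys p₁ cs = pvNewKeys p₂ cs := by
  induction cs generalizing p₁ p₂ with
  | nil => rfl
  | cons c r ih =>
    by_cases hc : c ∈ p₁
    · simp [pvNewKeys, hc, (h c).mp hc, ih h]
    · have hc2 : c ∉ p₂ := fun h2 => hc ((h c).mpr h2)
      have hrec : pvNewKeys (c :: p₁) r = pvNewKeys (c :: p₂) r :=
        @ih (c :: p₁) (c :: p₂) (fun x => by simp [h x])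
      simp only [pvNewKeys, if_neg hc, if_neg hc2, hrec]

lemma pv_update_eq_newKeys (cs s : List String) :
    PySem.Set.update s cs = s ++ pvNewKeys s cs := by
  induction cs generalizing s with
  | nil => simp [PySem.Set.update, pvNewKeys]
  | cons c r ih =>
    rw [PySem.Set.update_cons, PySem.Set.add_eq_ite]
    by_cases hc : c ∈ s
    · simp [hc, pvNewKeys, ih]
    · rw [if_neg hc, ih]
      simp only [pvNewKeys, if_neg hc, List.append_assoc, List.singleton_append]
      rw [pvNewKeys_congr r (p₂ := c :: s) (fun x => by simp; tauto)]

-- B's loop emits exactly one entry per first-seen canonical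
lemma pvLoopB_eq_map (groupes : List (List String)) (canons : List String)
    (alias_map : List (String × String)) (cs prev : List String) :
    pvLoopB groupes canons alias_map prev cs =
      (pvNewKeys prev cs).map (pvEntryB groupes canons alias_map) := by
  induction cs generalizing prev with
  | nil => rfl
  | cons c r ih =>
    by_cases hc : c ∈ prev
    · simp only [pvLoopB, if_pos hc, pvNewKeys]
      rw [ih, pvNewKeys_congr r (pv_mem_app_self hc)]
    · simp only [pvLoopB, if_neg hc, pvNewKeys]
      rw [ih, pvNewKeys_congr r (pv_mem_app_cons c prev)]
      simp

-- sorting a duplicate-free list depends only on its elements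
lemma pv_sorted_congr {s t : List String} (hs : s.Nodup) (h : s.Perm t) :
    PySem.List.sorted s (fun x => x) = PySem.List.sorted t (fun x => x) := by
  apply PySem.List.sorted_eq_of_perm_of_pairwise_lt
  · exact (PySem.List.sorted_perm t (fun x => x) false).trans h.symm
  · have hp := PySem.List.sorted_pairwise t (fun x => x)
    have hnd : (PySem.List.sorted t (fun x => x) false).Nodup :=
      ((PySem.List.sorted_perm t (fun x => x) false).nodup_iff).mpr (h.nodup_iff.mp hs)
    exact (hp.and hnd).imp (fun hab => lt_of_le_of_ne hab.1 hab.2)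

-- ===== VERDICT (by name: the statement is the Claim_ definition above) =====
theorem enrich_and_merge_groups_spec : Claim_equal_enrich_and_merge_groups := by
  intro groupes alias_map _ _
  unfold Spec_enrich_and_merge_groups enrich_and_merge_groups enrich_and_merge_groups_alt
  simp only []
  set am : PySem.Dict String String := PySem.Dict.mk alias_map with ham
  set cto : PySem.Dict String (PySem.Set String) :=
    alias_map.foldl (fun d p => d.modify p.2 PySem.Set.empty (fun s => s.add p.1)) PySem.Dict.empty with hcto
  set merged := groupes.foldl (pvStepA am cto) PySem.Dict.empty with hmerged
  set canons := groupes.map (pvCanonB am) with hcanons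
  -- A's keys are the first-appearance canonicals
  have hkeys : merged.keys = PySem.Set.ofList canons := by
    rw [hmerged, pvA_keys]
    simp only [PySem.Dict.keys_empty]
    rw [PySem.Set.update_nil_left]
    congr 1
    rw [hcanons]
    exact List.map_congr_left (fun g _ => pv_canon_eq am g)
  have hknd : merged.keys.Nodup := by rw [hkeys]; exact PySem.Set.nodup_ofList canons
  -- A's result as a map over its keys
  have hA : pvFinalizeA merged =
      merged.keys.map (fun k => k :: PySem.List.sorted ((merged.getD k PySem.Set.empty).discard k) (fun x => x)) := by
    unfold pvFinalizeA
    rw [PySem.List.foldl_append_singleton_eq_map,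
        PySem.Dict.items_eq_map_keys merged hknd PySem.Set.empty]
    simp [List.map_map, Function.comp]
  rw [hA, hkeys]
  -- B's result as a map over the same list
  rw [pvLoopB_eq_map]
  have hnk : pvNewKeys [] canons = PySem.Set.ofList canons := by
    have := pv_update_eq_newKeys canons []
    rw [PySem.Set.update_nil_left] at this
    simpa using this.symm
  rw [hnk]
  -- elementwise equality
  apply List.map_congr_left
  intro k hk
  have hkc : k ∈ canons := (PySem.Set.mem_ofList _ _).mp hk
  unfold pvEntryB
  simp only []
  congr 1
  -- both member sets are duplicate-free with the same elements
  have hndA : ((merged.getD k PySem.Set.empty).discard k).Nodup :=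
    PySem.Set.nodup_discard _ _ (pvA_nodup am cto groupes PySem.Dict.empty (fun k => by simp) k)
  have hndB : ((((PySem.Set.ofList (((groupes.zip canons).filter (fun p => p.2 == k)).flatMap (fun p => p.1))).update
      ((alias_map.filter (fun p => p.2 == k)).map (fun p => p.1))).discard k)).Nodup :=
    PySem.Set.nodup_discard _ _ (PySem.Set.nodup_update _ _ (PySem.Set.nodup_ofList _))
  apply pv_sorted_congr hndA
  rw [List.perm_ext_iff_of_nodup hndA hndB]
  intro x
  -- A side membership
  have hcto_mem : ∀ y, y ∈ cto.getD k PySem.Set.empty ↔ y ∈ pvOrigs alias_map k := by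
    intro y
    have h0 := pv_cto_mem alias_map PySem.Dict.empty k y
    rw [← hcto] at h0
    simpa using h0
  have hAset : x ∈ merged.getD k PySem.Set.empty ↔
      (∃ g ∈ groupes, pvCanonB am g = k ∧ x ∈ g) ∨ x ∈ pvOrigs alias_map k := by
    rw [hmerged, pvA_getD]
    simp only [PySem.Dict.getD_empty, PySem.Set.empty]
    constructor
    · rintro (h | ⟨g, hg, hc, hx | hx⟩)
      · simp at h
      · exact Or.inl ⟨g, hg, (pv_canon_eq am g) ▸ hc, hx⟩
      · exact Or.inr ((hcto_mem x).mp hx)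
    · rintro (⟨g, hg, hc, hx⟩ | hx)
      · exact Or.inr ⟨g, hg, (pv_canon_eq am g) ▸ hc, Or.inl hx⟩
      · obtain ⟨g, hg, hc⟩ : ∃ g ∈ groupes, pvCanonB am g = k := by
          rw [hcanons] at hkc; simpa using hkc
        exact Or.inr ⟨g, hg, (pv_canon_eq am g) ▸ hc, Or.inr ((hcto_mem x).mpr hx)⟩
  -- B side membership
  have hzip : groupes.zip canons = groupes.map (fun g => (g, pvCanonB am g)) := by
    rw [hcanons]
    have := List.zip_map' (f := fun g : List String => g) (g := pvCanonB am) (l := groupes)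
    simpa using this
  have hBset : x ∈ ((PySem.Set.ofList (((groupes.zip canons).filter (fun p => p.2 == k)).flatMap (fun p => p.1))).update
      ((alias_map.filter (fun p => p.2 == k)).map (fun p => p.1))) ↔
      (∃ g ∈ groupes, pvCanonB am g = k ∧ x ∈ g) ∨ x ∈ pvOrigs alias_map k := by
    rw [PySem.Set.mem_update, PySem.Set.mem_ofList, hzip, pvOrigs_mem]
    simp only [List.mem_flatMap, List.mem_filter, List.mem_map, beq_iff_eq]
    constructor
    · rintro (⟨p, ⟨⟨g, hg, rfl⟩, hpk⟩, hx⟩ | ⟨p, ⟨hp, hpk⟩, rfl⟩)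
      · exact Or.inl ⟨g, hg, hpk, hx⟩
      · exact Or.inr ⟨p, hp, hpk, rfl⟩
    · rintro (⟨g, hg, hc, hx⟩ | ⟨p, hp, hpk, rfl⟩)
      · exact Or.inl ⟨(g, pvCanonB am g), ⟨⟨g, hg, rfl⟩, hc⟩, hx⟩
      · exact Or.inr ⟨p, ⟨hp, hpk⟩, rfl⟩
  rw [PySem.Set.mem_discard, PySem.Set.mem_discard, hAset, hBset]
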